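-- pv_equiv track=rewrite | github.com/ilyayau/suaylang | suaylang/errors.py | _line_text
-- ===== SOURCE A (Python) =====
-- def _line_text(source: str, line: int) -> str | None:
--     if line <= 0:
--         return None
--     i = 1
--     start = 0
--     while i < line and start <= len(source):
--         nl = source.find("\n", start)
--         if nl == -1:
--             return None
--         start = nl + 1
--         i += 1
--     end = source.find("\n", start)
--     if end == -1:
--         end = len(source)
--     return source[start:end]
-- ===== SOURCE B (Python) =====
-- def _line_text(source: str, line: int) -> str | None:
--     if line <= 0:
--         return None
--     lines = source.split("\n")
--     if line > len(lines):
--         return None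
--     return lines[line - 1]
-- ===== Notes on version B (the rewrite author's own statement) =====
-- stated objective: simpler
-- what changed: Replaces the incremental find/start-index scanning loop with a one-shot split('\n') followed by a bounds check and direct indexing.
import Mathlib
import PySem

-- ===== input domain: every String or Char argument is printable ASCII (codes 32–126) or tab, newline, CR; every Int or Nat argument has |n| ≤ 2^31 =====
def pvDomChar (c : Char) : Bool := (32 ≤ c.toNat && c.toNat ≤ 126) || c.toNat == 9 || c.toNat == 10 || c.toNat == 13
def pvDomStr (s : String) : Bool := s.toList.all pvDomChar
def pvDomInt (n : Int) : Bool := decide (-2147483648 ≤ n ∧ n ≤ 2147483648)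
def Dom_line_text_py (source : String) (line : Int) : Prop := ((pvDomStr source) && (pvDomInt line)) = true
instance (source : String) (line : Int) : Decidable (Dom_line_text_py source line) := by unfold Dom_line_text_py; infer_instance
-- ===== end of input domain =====

-- B replaces A's incremental find/start-index scanning loop with a one-shot split on "\n"
-- plus a bounds check and direct indexing (objective: simpler).

-- ===== PORT A =====
-- the 'while i < line and start <= len(source)' loop; some start = normal exit, none = the 'return None' in the loop body
def lineTextLoop (source : String) (line i start : Int) : Option Int :=
  if h : i < line ∧ start ≤ PySem.Str.len source then
    let nl := PySem.Str.findFrom source "\n" start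
    if nl = -1 then none
    else lineTextLoop source line (i + 1) (nl + 1)
  else some start
termination_by (line - i).toNat
decreasing_by omega

-- the code after the loop: 'end = source.find("\n", start); if end == -1: end = len(source); return source[start:end]'
def lineTextPost (source : String) (r : Option Int) : Option String :=
  match r with
  | none => none
  | some start =>
    let e := PySem.Str.findFrom source "\n" start
    let e2 := if e = -1 then PySem.Str.len source else e
    some (PySem.Str.slice source (some start) (some e2))

def line_text_py (source : String) (line : Int) : Option String :=
  if line ≤ 0 then none
  else lineTextPost source (lineTextLoop source line 1 0)

-- ===== PORT B =====
def line_text_py_alt (source : String) (line : Int) : Option String :=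
  if line ≤ 0 then none
  else
    match PySem.Str.split? source "\n" with
    | none => none   -- unreachable: the separator "\n" is non-empty
    | some lines =>
      if (lines.length : Int) < line then none
      else PySem.List.pyGet? lines (line - 1)

-- ===== PRECONDITION & SPEC =====
def Spec_line_text_py (source : String) (line : Int) (out : Option String) : Prop := out = line_text_py_alt source line
instance (source : String) (line : Int) (out : Option String) : Decidable (Spec_line_text_py source line out) := by unfold Spec_line_text_py; infer_instance

-- ===== CLAIM (what is proved, stated in full; the proofs are below) =====
def Claim_equal_line_text_py : Prop := ∀ (source : String) (line : Int), Dom_line_text_py source line → Spec_line_text_py source line (line_text_py source line)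

-- ===== LEMMAS AND PROOFS =====

-- reference line-splitter: what source.split("\n") produces, as a structural recursion
def pyLines : List Char → List (List Char)
  | [] => [[]]
  | c :: rest =>
    if c = '\n' then [] :: pyLines rest
    else (c :: (pyLines rest).headI) :: (pyLines rest).tail

theorem pyLines_ne_nil (cs : List Char) : pyLines cs ≠ [] := by
  cases cs with
  | nil => simp [pyLines]
  | cons c rest => simp only [pyLines]; split <;> simp

-- the fuel-based splitOn.go, specialised to sep = ['\n'], computes pyLines
theorem splitOn_go_eq (l : List Char) : ∀ (fuel : Nat) (cur : List Char) (acc : List (List Char)),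
    l.length ≤ fuel →
    PySem.Chars.splitOn.go ['\n'] fuel l cur acc
      = acc.reverse ++ (cur.reverse ++ (pyLines l).headI) :: (pyLines l).tail := by
  induction l with
  | nil =>
    intro fuel cur acc _
    cases fuel <;> simp [PySem.Chars.splitOn.go, pyLines]
  | cons c rest ih =>
    intro fuel cur acc hf
    cases fuel with
    | zero => simp at hf
    | succ f =>
      have hr : rest.length ≤ f := by simpa using hf
      by_cases hc : c = '\n'
      · subst hc
        rw [show PySem.Chars.splitOn.go ['\n'] (f+1) ('\n' :: rest) cur acc
              = PySem.Chars.splitOn.go ['\n'] f rest [] (cur.reverse :: acc) by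
            simp [PySem.Chars.splitOn.go, List.isPrefixOf]]
        rw [ih f [] (cur.reverse :: acc) hr]
        obtain ⟨a, tl, hal⟩ := List.exists_cons_of_ne_nil (pyLines_ne_nil rest)
        simp [pyLines, hal]
      · rw [show PySem.Chars.splitOn.go ['\n'] (f+1) (c :: rest) cur acc
              = PySem.Chars.splitOn.go ['\n'] f rest (c :: cur) acc by
            simp only [PySem.Chars.splitOn.go, List.isPrefixOf]
            simp only [Bool.and_eq_true, beq_iff_eq]
            rw [if_neg (by simp [Ne.symm hc])]]
        rw [ih f (c :: cur) acc hr]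
        obtain ⟨a, tl, hal⟩ := List.exists_cons_of_ne_nil (pyLines_ne_nil rest)
        simp [pyLines, hal, hc]

theorem splitOn_newline (cs : List Char) :
    PySem.Chars.splitOn cs ['\n'] = pyLines cs := by
  rw [PySem.Chars.splitOn, splitOn_go_eq cs (cs.length + 1) [] [] (by omega)]
  obtain ⟨a, tl, hal⟩ := List.exists_cons_of_ne_nil (pyLines_ne_nil cs)
  simp [hal]

theorem singleton_prefix_iff (c : Char) (u : List Char) : [c] <+: u ↔ u.head? = some c := by
  cases u <;> simp [List.cons_prefix_cons, eq_comm]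

theorem pyLines_no_nl (t : List Char) (h : '\n' ∉ t) : pyLines t = [t] := by
  induction t with
  | nil => rfl
  | cons c rest ih =>
    have hc : c ≠ '\n' := by intro hc; exact h (hc ▸ List.mem_cons_self)
    have := ih (fun hm => h (List.mem_cons_of_mem _ hm))
    simp [pyLines, hc, this]

theorem pyLines_with_nl (t : List Char) : ∀ (m : Nat), t[m]? = some '\n' →
    (∀ i, i < m → t[i]? ≠ some '\n') →
    pyLines t = t.take m :: pyLines (t.drop (m+1)) := by
  induction t with
  | nil => intro m hm _; simp at hm
  | cons c rest ih =>
    intro m hm hmin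
    cases m with
    | zero =>
      simp at hm
      simp [pyLines, hm]
    | succ m =>
      have hc : c ≠ '\n' := by
        intro hc; exact hmin 0 (Nat.succ_pos _) (by simp [hc])
      have h1 : rest[m]? = some '\n' := by simpa using hm
      have h2 : ∀ i, i < m → rest[i]? ≠ some '\n' := by
        intro i hi hbad
        exact hmin (i+1) (by omega) (by simpa using hbad)
      have := ih m h1 h2
      simp [pyLines, hc, this]

-- find t ['\n'] = -1 means no newline in t
theorem find_nl_none (t : List Char) (h : PySem.Chars.find t ['\n'] = -1) : pyLines t = [t] := by
  apply pyLines_no_nl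
  intro hm
  rw [PySem.Chars.find_eq_neg_one_iff] at h
  apply h
  obtain ⟨l1, l2, rfl⟩ := List.mem_iff_append.mp hm
  exact ⟨l1, l2, by simp⟩

-- find t ['\n'] ≥ 0 points at the first newline
theorem find_nl_some (t : List Char) (h : PySem.Chars.find t ['\n'] ≠ -1) :
    (PySem.Chars.find t ['\n']).toNat < t.length ∧
    pyLines t = t.take (PySem.Chars.find t ['\n']).toNat
      :: pyLines (t.drop ((PySem.Chars.find t ['\n']).toNat + 1)) := by
  have h0 : 0 ≤ PySem.Chars.find t ['\n'] := by
    have := PySem.Chars.neg_one_le_find t ['\n']; omega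
  obtain ⟨hpre, hmin⟩ := PySem.Chars.find_spec h0
  rw [singleton_prefix_iff, List.head?_drop] at hpre
  have hlt : (PySem.Chars.find t ['\n']).toNat < t.length := by
    by_contra hge
    rw [List.getElem?_eq_none (by omega)] at hpre
    simp at hpre
  refine ⟨hlt, pyLines_with_nl t _ hpre ?_⟩
  intro i hi hbad
  exact hmin i hi ((singleton_prefix_iff '\n' (t.drop i)).mpr (by rw [List.head?_drop]; exact hbad))

-- the main loop invariant: from state (i = line - k, start = s), A's remaining computation
-- returns exactly line k (0-based) of the lines of the suffix source[s:]
theorem loopMain (source : String) (line : Int) : ∀ (k : Nat) (s : Nat),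
    s ≤ source.toList.length →
    lineTextPost source (lineTextLoop source line (line - k) s)
      = ((pyLines (source.toList.drop s)).map String.ofList)[k]? := by
  intro k
  induction k with
  | zero =>
    intro s hs
    rw [lineTextLoop]
    rw [dif_neg (by push_cast; omega)]
    rw [lineTextPost]
    rw [PySem.Str.findFrom_eq, show ("\n" : String).toList = ['\n'] from rfl,
        PySem.Chars.findFrom_natCast source.toList ['\n'] s hs]
    by_cases hf : PySem.Chars.find (source.toList.drop s) ['\n'] = -1
    · rw [if_pos hf]
      rw [if_pos rfl]
      rw [find_nl_none _ hf]
      rw [PySem.Str.len_eq, PySem.Str.slice]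
      simp only [PySem.Chars.slice_eq_listSlice]
      rw [PySem.List.slice_toNat source.toList (by positivity) (by positivity)]
      simp [List.take_of_length_le]
    · rw [if_neg hf]
      obtain ⟨hlt, heq⟩ := find_nl_some _ hf
      have h0 : 0 ≤ PySem.Chars.find (source.toList.drop s) ['\n'] := by
        have := PySem.Chars.neg_one_le_find (source.toList.drop s) ['\n']; omega
      rw [if_neg (by omega)]
      rw [heq]
      rw [PySem.Str.slice]
      simp only [PySem.Chars.slice_eq_listSlice]
      rw [PySem.List.slice_toNat source.toList (by positivity) (by omega)]
      have : ((s : Int) + PySem.Chars.find (source.toList.drop s) ['\n']).toNat - s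
          = (PySem.Chars.find (source.toList.drop s) ['\n']).toNat := by omega
      simp [this]
  | succ k ih =>
    intro s hs
    rw [lineTextLoop]
    rw [dif_pos (by refine ⟨by omega, ?_⟩; rw [PySem.Str.len_eq]; exact_mod_cast hs)]
    simp only
    rw [PySem.Str.findFrom_eq, show ("\n" : String).toList = ['\n'] from rfl,
        PySem.Chars.findFrom_natCast source.toList ['\n'] s hs]
    by_cases hf : PySem.Chars.find (source.toList.drop s) ['\n'] = -1
    · rw [if_pos hf, if_pos rfl, find_nl_none _ hf]
      simp [lineTextPost]
    · rw [if_neg hf]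
      obtain ⟨hlt, heq⟩ := find_nl_some _ hf
      have h0 : 0 ≤ PySem.Chars.find (source.toList.drop s) ['\n'] := by
        have := PySem.Chars.neg_one_le_find (source.toList.drop s) ['\n']; omega
      rw [if_neg (by omega)]
      set m := (PySem.Chars.find (source.toList.drop s) ['\n']).toNat with hm
      have hslen : m < source.toList.length - s := by
        simpa [List.length_drop] using hlt
      have harg1 : line - ↑(k+1) + 1 = line - ↑k := by push_cast; omega
      have harg2 : (s : Int) + PySem.Chars.find (source.toList.drop s) ['\n'] + 1
          = ((s + m + 1 : Nat) : Int) := by push_cast; omega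
      rw [harg1, harg2, ih (s + m + 1) (by omega)]
      have hdrop : source.toList.drop (s + m + 1) = (source.toList.drop s).drop (m + 1) := by
        rw [List.drop_drop]; ring_nf
      rw [hdrop, heq]
      simp

-- ===== VERDICT (by name: the statement is the Claim_ definition above) =====

theorem line_text_py_spec : Claim_equal_line_text_py := by
  intro source line _dom
  unfold Spec_line_text_py line_text_py line_text_py_alt
  by_cases hl : line ≤ 0
  · rw [if_pos hl, if_pos hl]
  · rw [if_neg hl, if_neg hl]
    have h1 : 1 ≤ line := by omega
    have hmain := loopMain source line (line - 1).toNat 0 (Nat.zero_le _)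
    have hk : line - ((line - 1).toNat : Int) = 1 := by omega
    rw [hk] at hmain
    rw [show ((0 : Nat) : Int) = (0 : Int) from rfl, List.drop_zero] at hmain
    rw [hmain]
    rw [PySem.Str.split?, show ("\n" : String).toList = ['\n'] from rfl,
        PySem.Chars.split?, if_neg (by simp), splitOn_newline]
    simp only [Option.map_some]
    set L := (pyLines source.toList).map String.ofList with hL
    have hline : line - 1 = (((line - 1).toNat : Nat) : Int) := by omega
    by_cases hlen : (L.length : Int) < line
    · rw [if_pos hlen]
      rw [List.getElem?_eq_none (by omega)]
    · rw [if_neg hlen]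
      rw [hline, PySem.List.pyGet?_natCast]
      simp
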